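-- pv_equiv track=rewrite | github.com/ryansmccoy/feed-spine | benchmarks/multi_lang_benchmark.py | split_docs_manual_scan
-- ===== SOURCE A (Python) =====
-- def split_docs_manual_scan(content: str) -> list[tuple[int, int]]:
--     """Manual string scanning without regex."""
--     results = []
--     pos = 0
--     marker = '<DOCUMENT>'
--     while True:
--         idx = content.find(marker, pos)
--         if idx == -1:
--             break
--         # Find type
--         type_start = content.find('<TYPE>', idx)
--         if type_start != -1:
--             type_end = content.find('\n', type_start)
--             results.append((idx, type_end))
--         pos = idx + len(marker)
--     return results
-- ===== SOURCE B (Python) =====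
-- def split_docs_manual_scan(content: str) -> list[tuple[int, int]]:
--     """Index-then-merge: precompute all marker occurrences once, then pair
--     each document with the first type entry at or after it by a single
--     monotone pointer sweep (no per-document rescan)."""
--     def occurrences(sub):
--         out = []
--         pos = 0
--         while True:
--             i = content.find(sub, pos)
--             if i == -1:
--                 break
--             out.append(i)
--             pos = i + len(sub)
--         return out
--
--     docs = occurrences('<DOCUMENT>')
--     types = [(t, content.find('\n', t)) for t in occurrences('<TYPE>')]
--     results = []
--     j = 0
--     for d in docs:
--         while j < len(types) and types[j][0] < d:
--             j += 1
--         if j < len(types):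
--             results.append((d, types[j][1]))
--     return results
-- ===== Notes on version B (the rewrite author's own statement) =====
-- stated objective: alternative
-- what changed: A rescans forward for the type marker from every document-marker hit; B precomputes the occurrence lists of both markers (with each type entry's newline offset) once and pairs documents with type entries by a single monotone merge sweep.
import Mathlib
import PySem

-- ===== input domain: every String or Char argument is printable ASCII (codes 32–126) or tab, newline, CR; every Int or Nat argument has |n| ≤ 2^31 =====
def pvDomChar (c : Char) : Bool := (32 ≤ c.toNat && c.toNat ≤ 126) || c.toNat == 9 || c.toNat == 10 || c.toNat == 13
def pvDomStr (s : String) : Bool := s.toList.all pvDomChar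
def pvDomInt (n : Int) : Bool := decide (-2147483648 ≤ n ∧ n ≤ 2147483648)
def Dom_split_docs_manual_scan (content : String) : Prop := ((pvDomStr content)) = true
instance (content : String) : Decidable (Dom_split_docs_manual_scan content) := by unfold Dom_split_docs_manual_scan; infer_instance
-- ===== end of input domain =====

-- B replaces A's per-document forward rescan for '<TYPE>' by a precomputed occurrence
-- table plus a single monotone merge sweep (objective: faster only if measured; otherwise alternative).

def pvDocM : List Char := "<DOCUMENT>".toList
def pvTypM : List Char := "<TYPE>".toList
def pvNL : List Char := "\n".toList

-- ===== PORT A =====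
-- A's while-True loop: pos advances by at least 10 per iteration, so
-- fuel = length + 1 never runs out.
def pvScanA (s : List Char) (pos : Nat) (fuel : Nat) : List (Int × Int) :=
  match fuel with
  | 0 => []
  | fuel + 1 =>
    let idx := PySem.Chars.findFrom s pvDocM (pos : Int)
    if idx = -1 then []
    else
      let type_start := PySem.Chars.findFrom s pvTypM idx
      if type_start ≠ -1 then
        (idx, PySem.Chars.findFrom s pvNL type_start) :: pvScanA s (idx.toNat + 10) fuel
      else pvScanA s (idx.toNat + 10) fuel

def split_docs_manual_scan (content : String) : List (Int × Int) :=
  pvScanA content.toList 0 (content.toList.length + 1)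

-- ===== PORT B =====
-- B's `occurrences` helper: repeated find stepping past each hit (fuel as above).
def pvOccs (s sub : List Char) (pos : Nat) (fuel : Nat) : List Nat :=
  match fuel with
  | 0 => []
  | fuel + 1 =>
    let i := PySem.Chars.findFrom s sub (pos : Int)
    if i = -1 then []
    else i.toNat :: pvOccs s sub (i.toNat + sub.length) fuel

-- B's merge sweep: the retained `types` tail plays the role of the pointer j.
def pvMerge (types : List (Nat × Int)) (docs : List Nat) : List (Int × Int) :=
  match docs with
  | [] => []
  | d :: ds =>
    match List.dropWhile (fun q => q.1 < d) types with
    | [] => pvMerge [] ds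
    | (t, te) :: rest => ((d : Int), te) :: pvMerge ((t, te) :: rest) ds

def split_docs_manual_scan_alt (content : String) : List (Int × Int) :=
  let s := content.toList
  let docs := pvOccs s pvDocM 0 (s.length + 1)
  let types := (pvOccs s pvTypM 0 (s.length + 1)).map
    (fun (t : Nat) => (t, PySem.Chars.findFrom s pvNL (t : Int)))
  pvMerge types docs

-- ===== PRECONDITION & SPEC =====
def Spec_split_docs_manual_scan (content : String) (out : List (Int × Int)) : Prop := out = split_docs_manual_scan_alt content
instance (content : String) (out : List (Int × Int)) : Decidable (Spec_split_docs_manual_scan content out) := by unfold Spec_split_docs_manual_scan; infer_instance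

-- ===== CLAIM (what is proved, stated in full; the proofs are below) =====
def Claim_equal_split_docs_manual_scan : Prop := ∀ (content : String), Dom_split_docs_manual_scan content → Spec_split_docs_manual_scan content (split_docs_manual_scan content)

-- ===== LEMMAS AND PROOFS =====

lemma pvDocM_len : pvDocM.length = 10 := rfl
lemma pvTypM_len : pvTypM.length = 6 := rfl

-- B's type table, as the proofs see it.
def pvTypesT (s : List Char) : List (Nat × Int) :=
  (pvOccs s pvTypM 0 (s.length + 1)).map (fun (t : Nat) => (t, PySem.Chars.findFrom s pvNL (t : Int)))

-- the raw type-occurrence list from position 0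
def pvTypL (s : List Char) : List Nat := pvOccs s pvTypM 0 (s.length + 1)

lemma pvMerge_cons (types : List (Nat × Int)) (d : Nat) (ds : List Nat) :
    pvMerge types (d :: ds) =
      match List.dropWhile (fun q => q.1 < d) types with
      | [] => pvMerge [] ds
      | (t, te) :: rest => ((d : Int), te) :: pvMerge ((t, te) :: rest) ds := rfl

-- every element of pvOccs is an occurrence at or after the start position
lemma pvOccs_sound (s sub : List Char) (hsub : sub ≠ []) :
    ∀ fuel pos, pos ≤ s.length → ∀ j ∈ pvOccs s sub pos fuel, pos ≤ j ∧ sub <+: List.drop j s := by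
  intro fuel
  induction fuel with
  | zero => intro pos _ j hj; simp [pvOccs] at hj
  | succ f ih =>
    intro pos hpos j hj
    simp only [pvOccs] at hj
    by_cases hneg : PySem.Chars.findFrom s sub (pos : Int) = -1
    · simp [hneg] at hj
    · obtain ⟨hle, hpre, _⟩ := PySem.Chars.findFrom_natCast_spec s sub pos hpos hneg
      have hs : 0 < sub.length := List.length_pos_iff.mpr hsub
      have hlen : (PySem.Chars.findFrom s sub (pos : Int)).toNat + sub.length ≤ s.length := by
        have h1 := hpre.length_le
        simp only [List.length_drop] at h1
        omega
      simp only [hneg, if_false] at hj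
      rcases List.mem_cons.mp hj with rfl | hj
      · exact ⟨by omega, hpre⟩
      · have h2 := ih ((PySem.Chars.findFrom s sub (pos : Int)).toNat + sub.length)
          (by omega) j hj
        exact ⟨by omega, h2.2⟩

-- pvOccs is strictly increasing
lemma pvOccs_sorted (s sub : List Char) (hsub : sub ≠ []) :
    ∀ fuel pos, pos ≤ s.length → (pvOccs s sub pos fuel).Pairwise (· < ·) := by
  intro fuel
  induction fuel with
  | zero => intro pos _; simp [pvOccs]
  | succ f ih =>
    intro pos hpos
    simp only [pvOccs]
    by_cases hneg : PySem.Chars.findFrom s sub (pos : Int) = -1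
    · simp [hneg]
    · obtain ⟨hle, hpre, _⟩ := PySem.Chars.findFrom_natCast_spec s sub pos hpos hneg
      have hs : 0 < sub.length := List.length_pos_iff.mpr hsub
      have hlen : (PySem.Chars.findFrom s sub (pos : Int)).toNat + sub.length ≤ s.length := by
        have h1 := hpre.length_le
        simp only [List.length_drop] at h1
        omega
      simp only [hneg, if_false]
      refine List.Pairwise.cons ?_ (ih _ (by omega))
      intro j hj
      have := (pvOccs_sound s sub hsub f ((PySem.Chars.findFrom s sub (pos : Int)).toNat + sub.length)
        (by omega) j hj).1
      omega

-- '<TYPE>' cannot overlap itself: two distinct occurrences are at least 6 apart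
lemma pvTyp_no_overlap (s : List Char) (a b : Nat) (ha : pvTypM <+: List.drop a s)
    (hb : pvTypM <+: List.drop b s) (hab : a < b) : a + 6 ≤ b := by
  by_contra hcon
  obtain ⟨u, hu⟩ := ha
  obtain ⟨v, hv⟩ := hb
  set d := b - a with hd
  have hd1 : 1 ≤ d := by omega
  have hd5 : d ≤ 5 := by omega
  have h1 : s[b]? = some '<' := by
    have h0 : (List.drop b s)[0]? = some '<' := by
      rw [← hv]
      rw [List.getElem?_append_left (by simp [pvTypM])]
      rfl
    simpa using h0
  have h2 : s[a + d]? = pvTypM[d]? := by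
    have h0 : (List.drop a s)[d]? = pvTypM[d]? := by
      rw [← hu]
      rw [List.getElem?_append_left (by simp [pvTypM]; omega)]
    simpa using h0
  have hb' : a + d = b := by omega
  rw [hb', h1] at h2
  interval_cases d <;> exact absurd h2.symm (by decide)

-- every occurrence of '<TYPE>' at or after pos appears in pvOccs
lemma pvOccs_typ_complete (s : List Char) :
    ∀ fuel pos, pos ≤ s.length → s.length + 1 ≤ fuel + pos →
      ∀ j, pos ≤ j → pvTypM <+: List.drop j s → j ∈ pvOccs s pvTypM pos fuel := by
  intro fuel
  induction fuel with
  | zero => intro pos hpos hfuel; omega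
  | succ f ih =>
    intro pos hpos hfuel j hj hpre
    have hinf : pvTypM <:+: List.drop pos s := by
      rw [← PySem.Chars.isIn_iff_infix, ← PySem.Chars.exists_prefix_drop_iff_isIn]
      refine ⟨j - pos, ?_⟩
      rw [List.drop_drop]
      rwa [Nat.add_sub_cancel' hj]
    have hneg : PySem.Chars.findFrom s pvTypM (pos : Int) ≠ -1 := by
      intro hcon
      rw [PySem.Chars.findFrom_natCast_eq_neg_one_iff s pvTypM pos hpos] at hcon
      exact hcon hinf
    obtain ⟨hle, hifound, hmin⟩ := PySem.Chars.findFrom_natCast_spec s pvTypM pos hpos hneg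
    have hlen : (PySem.Chars.findFrom s pvTypM (pos : Int)).toNat + 6 ≤ s.length := by
      have h1 := hifound.length_le
      simp only [List.length_drop, pvTypM_len] at h1
      omega
    have hij : (PySem.Chars.findFrom s pvTypM (pos : Int)).toNat ≤ j := by
      by_contra hcon
      exact hmin j hj (by omega) hpre
    simp only [pvOccs]
    rw [if_neg hneg]
    rcases Nat.eq_or_lt_of_le hij with heq | hlt
    · exact List.mem_cons.mpr (Or.inl heq.symm)
    · have hstep : (PySem.Chars.findFrom s pvTypM (pos : Int)).toNat + 6 ≤ j :=
        pvTyp_no_overlap s _ j hifound hpre hlt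
      refine List.mem_cons.mpr (Or.inr ?_)
      rw [pvTypM_len]
      exact ih _ (by omega) (by omega) j (by omega) hpre

lemma pvDropWhile_head_false {α : Type} (p : α → Bool) :
    ∀ (l : List α) (h : α) (t : List α), l.dropWhile p = h :: t → p h = false := by
  intro l
  induction l with
  | nil => intro h t hcon; simp [List.dropWhile] at hcon
  | cons a l ih =>
    intro h t hdrop
    by_cases hpa : p a = true
    · rw [List.dropWhile_cons_of_pos hpa] at hdrop
      exact ih h t hdrop
    · rw [List.dropWhile_cons_of_neg hpa] at hdrop
      cases hdrop
      simpa using hpa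

-- A's per-document find('<TYPE>', k) is exactly the head of the table tail ≥ k: no hit …
lemma pvFirstGe_nil (s : List Char) (k : Nat) (hk : k ≤ s.length)
    (hnil : (pvTypL s).dropWhile (fun t => t < k) = []) :
    PySem.Chars.findFrom s pvTypM (k : Int) = -1 := by
  rw [PySem.Chars.findFrom_natCast_eq_neg_one_iff s pvTypM k hk]
  intro hinf
  rw [← PySem.Chars.isIn_iff_infix, ← PySem.Chars.exists_prefix_drop_iff_isIn] at hinf
  obtain ⟨m, hm⟩ := hinf
  rw [List.drop_drop] at hm
  have hmem : k + m ∈ pvTypL s :=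
    pvOccs_typ_complete s (s.length + 1) 0 (by omega) (by omega) (k + m) (by omega) hm
  have hlt := List.dropWhile_eq_nil_iff.mp hnil _ hmem
  simp only [decide_eq_true_eq] at hlt
  omega

-- … and a hit
lemma pvFirstGe_cons (s : List Char) (k : Nat) (hk : k ≤ s.length) (h : Nat) (rest : List Nat)
    (hcons : (pvTypL s).dropWhile (fun t => t < k) = h :: rest) :
    PySem.Chars.findFrom s pvTypM (k : Int) = (h : Int) := by
  have hhmem : h ∈ pvTypL s :=
    (List.dropWhile_sublist _).subset (by rw [hcons]; exact List.mem_cons.mpr (Or.inl rfl))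
  have hhge : ¬ h < k := by
    have := pvDropWhile_head_false _ (pvTypL s) h rest hcons
    simpa using this
  obtain ⟨-, hhocc⟩ := pvOccs_sound s pvTypM (by decide) (s.length + 1) 0 (by omega) h hhmem
  have hneg : PySem.Chars.findFrom s pvTypM (k : Int) ≠ -1 := by
    intro hcon
    rw [PySem.Chars.findFrom_natCast_eq_neg_one_iff s pvTypM k hk] at hcon
    apply hcon
    rw [← PySem.Chars.isIn_iff_infix, ← PySem.Chars.exists_prefix_drop_iff_isIn]
    refine ⟨h - k, ?_⟩
    rw [List.drop_drop]
    rwa [Nat.add_sub_cancel' (by omega : k ≤ h)]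
  obtain ⟨hle, hifound, hmin⟩ := PySem.Chars.findFrom_natCast_spec s pvTypM k hk hneg
  set i := PySem.Chars.findFrom s pvTypM (k : Int) with hi
  have hile : i.toNat ≤ h := by
    by_contra hcon
    exact hmin h (by omega) (by omega) hhocc
  have himem : i.toNat ∈ pvTypL s :=
    pvOccs_typ_complete s (s.length + 1) 0 (by omega) (by omega) i.toNat (by omega) hifound
  have hidrop : i.toNat ∈ h :: rest := by
    rw [← hcons]
    rw [← List.takeWhile_append_dropWhile (p := fun t => decide (t < k)) (l := pvTypL s)]
      at himem
    rcases List.mem_append.mp himem with htk | hdk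
    · have := List.mem_takeWhile_imp htk
      simp only [decide_eq_true_eq] at this
      omega
    · exact hdk
  have hsorted : ((pvTypL s).dropWhile (fun t => t < k)).Pairwise (· < ·) :=
    List.Pairwise.sublist (List.dropWhile_sublist _)
      (pvOccs_sorted s pvTypM (by decide) (s.length + 1) 0 (by omega))
  have hhi : h = i.toNat := by
    rcases List.mem_cons.mp hidrop with heq | hmem
    · omega
    · have hlt : h < i.toNat := by
        rw [hcons] at hsorted
        exact (List.pairwise_cons.mp hsorted).1 _ hmem
      omega
  have hnonneg : (0 : Int) ≤ i := le_trans (by positivity) hle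
  omega

-- dropping below a larger bound absorbs an earlier drop below a smaller one
lemma pvDropDrop {α : Type} (f : α → Nat) (p d : Nat) (hpd : p ≤ d) :
    ∀ l : List α,
      (l.dropWhile (fun q => f q < p)).dropWhile (fun q => f q < d) =
        l.dropWhile (fun q => f q < d) := by
  intro l
  induction l with
  | nil => rfl
  | cons a l ih =>
    by_cases ha : f a < p
    · rw [List.dropWhile_cons_of_pos (by simpa using ha),
        List.dropWhile_cons_of_pos (by simp only [decide_eq_true_eq]; omega), ih]
    · rw [List.dropWhile_cons_of_neg (by simpa using ha)]

lemma pvDropZero {α : Type} (f : α → Nat) :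
    ∀ l : List α, l.dropWhile (fun q => f q < 0) = l := by
  intro l
  cases l with
  | nil => rfl
  | cons a l => rw [List.dropWhile_cons_of_neg (by simp)]

-- the main loop invariant: A's scan from pos equals B's merge over the remaining
-- documents against the (partially consumed) type table
lemma pvMain (s : List Char) :
    ∀ fuel pos p, pos ≤ s.length → s.length + 1 ≤ fuel + pos → p ≤ pos →
      pvScanA s pos fuel =
        pvMerge ((pvTypesT s).dropWhile (fun q => q.1 < p)) (pvOccs s pvDocM pos fuel) := by
  intro fuel
  induction fuel with
  | zero => intro pos p hpos hfuel; omega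
  | succ f ih =>
    intro pos p hpos hfuel hp
    simp only [pvScanA, pvOccs]
    by_cases hneg : PySem.Chars.findFrom s pvDocM (pos : Int) = -1
    · simp [hneg, pvMerge]
    · obtain ⟨hle, hpre, _⟩ := PySem.Chars.findFrom_natCast_spec s pvDocM pos hpos hneg
      set i := PySem.Chars.findFrom s pvDocM (pos : Int) with hi
      have hnonneg : (0 : Int) ≤ i := le_trans (by positivity) hle
      have hiN : i = ((i.toNat : Nat) : Int) := (Int.toNat_of_nonneg hnonneg).symm
      have hposle : pos ≤ i.toNat := by omega
      have hbound : i.toNat + 10 ≤ s.length := by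
        have h1 := hpre.length_le
        simp only [List.length_drop, pvDocM_len] at h1
        omega
      rw [if_neg hneg, if_neg hneg, pvDocM_len, pvMerge_cons]
      rw [pvDropDrop (fun (q : Nat × Int) => q.1) p i.toNat (by omega)]
      have hmap : List.dropWhile (fun q => q.1 < i.toNat) (pvTypesT s) =
          ((pvTypL s).dropWhile (fun t => t < i.toNat)).map
            (fun (t : Nat) => (t, PySem.Chars.findFrom s pvNL (t : Int))) := by
        unfold pvTypesT pvTypL
        rw [List.dropWhile_map]
        rfl
      rw [hmap]
      cases hD : (pvTypL s).dropWhile (fun t => t < i.toNat) with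
      | nil =>
        -- no type at or after this document: A skips, B's table tail is empty
        have hts : PySem.Chars.findFrom s pvTypM i = -1 := by
          rw [hiN]; exact pvFirstGe_nil s i.toNat (by omega) hD
        rw [hts]
        simp only [List.map_nil, ne_eq, not_true_eq_false, if_false]
        rw [ih (i.toNat + 10) i.toNat (by omega) (by omega) (by omega), hmap, hD, List.map_nil]
      | cons h rest =>
        -- first type at or after this document is h, paired with its table type_end
        have hts : PySem.Chars.findFrom s pvTypM i = (h : Int) := by
          rw [hiN]; exact pvFirstGe_cons s i.toNat (by omega) h rest hD
        rw [hts]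
        have hne : ((h : Int) ≠ -1) := by omega
        simp only [List.map_cons, ne_eq, if_pos hne]
        rw [ih (i.toNat + 10) i.toNat (by omega) (by omega) (by omega), hmap, hD, List.map_cons]
        rw [← hiN]

-- ===== VERDICT (by name: the statement is the Claim_ definition above) =====
theorem split_docs_manual_scan_spec : Claim_equal_split_docs_manual_scan := by
  intro content _
  unfold Spec_split_docs_manual_scan split_docs_manual_scan split_docs_manual_scan_alt
  have h := pvMain content.toList (content.toList.length + 1) 0 0 (by omega) (by omega)
    (by omega)
  rw [h, show (pvTypesT content.toList).dropWhile (fun q => q.1 < 0) = pvTypesT content.toList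
    from pvDropZero (fun (q : Nat × Int) => q.1) _]
  rfl
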